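-- pv_equiv track=rewrite | github.com/telenewbie/test4script | python/androidanalysis/utils/mergeDataUtils.py | merge_y_1
-- ===== SOURCE A (Python) =====
-- def merge_y_1(x_list, x_name, y_name, iterables):
--     '''
--     如果不存在相应的 x坐标 则需要将 之前的值 进行累加
--
--     :param x_list:
--     :param x_name:
--     :param y_name:
--     :param iterables:
--     :return:
--     '''
--     _y = {}
--     for i in x_list:
--         _y[i] = 0
--         pass
--     # 进行合并
--     for it in iterables:
--         if iterables[it] is None:
--             continue
--         has_key_x = x_name in iterables[it]
--         has_key_y = y_name in iterables[it]
--         if has_key_x and has_key_y: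
--             same_key_len = len(iterables[it][x_name]) == len(iterables[it][y_name])
--             if same_key_len:  # 长度相等才可以
--                 success_find_index = 0
--                 for i in x_list:
--                     if i in iterables[it][x_name]:
--                         success_find_index = iterables[it][x_name].index(i)
--                     # 取前一个值进行累加，如果没有前一个值则默认为0
--                     _y[i] += iterables[it][y_name][success_find_index]
--                     # print "第 %s 个值:%s,加入进来的值：%s" % (i, _y[i], iterables[it][y_name][success_find_index])
--                     pass
--
--     _list = []
--     for y in sorted(_y):
--         _list.append(_y[y])
--     return _list
-- ===== SOURCE B (Python) =====
-- def merge_y_1(x_list, x_name, y_name, iterables):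
--     totals = {i: 0 for i in x_list}
--     n = len(x_list)
--     for data in iterables.values():
--         if data is None:
--             continue
--         xs = data.get(x_name)
--         ys = data.get(y_name)
--         if xs is None or ys is None or len(xs) != len(ys):
--             continue
--         first = {v: j for j, v in reversed(list(enumerate(xs)))}
--         # positions of x_list where the carried source index changes, with the new index
--         hits = [(p, first[v]) for p, v in enumerate(x_list) if v in first]
--         # build this dataset's contribution vector by filling constant segments
--         vec = []
--         prev_pos, prev_idx = 0, 0
--         for pos, idx in hits:
--             if pos > prev_pos:
--                 vec += [ys[prev_idx]] * (pos - prev_pos)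
--             prev_pos, prev_idx = pos, idx
--         if n > prev_pos:
--             vec += [ys[prev_idx]] * (n - prev_pos)
--         for i, c in zip(x_list, vec):
--             totals[i] += c
--     return [totals[k] for k in sorted(totals)]
-- ===== Notes on version B (the rewrite author's own statement) =====
-- stated objective: alternative
-- what changed: Instead of per-element membership scans with '.index' and a carried index over the whole grid, B finds per dataset the hit positions where the source index changes (a first-index dict plus one filter pass) and builds the contribution vector by filling constant segments between hits, then zip-adds it into the totals.
import Mathlib
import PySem

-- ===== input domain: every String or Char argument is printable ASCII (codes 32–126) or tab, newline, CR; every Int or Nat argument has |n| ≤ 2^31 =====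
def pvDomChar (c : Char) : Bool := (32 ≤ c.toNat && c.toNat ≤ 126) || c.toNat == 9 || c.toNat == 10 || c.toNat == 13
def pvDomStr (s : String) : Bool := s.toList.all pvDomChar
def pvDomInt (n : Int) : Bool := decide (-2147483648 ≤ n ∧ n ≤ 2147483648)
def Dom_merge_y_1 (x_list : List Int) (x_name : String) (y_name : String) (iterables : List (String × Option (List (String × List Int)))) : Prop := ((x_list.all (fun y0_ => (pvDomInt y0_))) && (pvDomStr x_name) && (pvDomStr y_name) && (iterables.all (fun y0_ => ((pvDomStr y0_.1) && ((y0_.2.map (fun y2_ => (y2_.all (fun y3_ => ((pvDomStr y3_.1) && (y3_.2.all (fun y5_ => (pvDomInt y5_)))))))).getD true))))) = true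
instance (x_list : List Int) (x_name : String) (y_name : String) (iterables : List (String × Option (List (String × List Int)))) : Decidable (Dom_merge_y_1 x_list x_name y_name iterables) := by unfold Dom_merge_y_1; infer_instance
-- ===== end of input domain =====

-- B replaces A's per-element membership + '.index' scans with a hit-position list per dataset and
-- builds each contribution vector by filling constant segments; return values proved equal on Pre_.

-- ===== PORT A =====
-- 'for it in iterables' iterates the dict's keys and looks each value up (first match);
-- ya[success_find_index] is ported with pyGetD default 0: the out-of-range (IndexError) case is excluded by Pre_.
def merge_y_1 (x_list : List Int) (x_name : String) (y_name : String)
    (iterables : List (String × Option (List (String × List Int)))) : List Int :=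
  let y0 : PySem.Dict Int Int := x_list.foldl (fun d i => d.insert i 0) PySem.Dict.empty
  let yd : PySem.Dict Int Int :=
    (iterables.map Prod.fst).foldl (fun d it =>
      match (PySem.Dict.mk iterables).get? it with
      | none => d
      | some none => d      -- iterables[it] is None: continue
      | some (some itdata) =>
        let dd : PySem.Dict String (List Int) := PySem.Dict.mk itdata
        if dd.contains x_name && dd.contains y_name then
          let xa := dd.getD x_name []
          let ya := dd.getD y_name []
          if xa.length == ya.length then
            (x_list.foldl (fun (st : PySem.Dict Int Int × Int) i =>
                let sfi : Int :=
                  if xa.contains i then (((PySem.List.index? xa i).getD 0 : Nat) : Int) else st.2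
                (st.1.modify i 0 (· + PySem.List.pyGetD ya sfi 0), sfi))
              (d, 0)).1
          else d
        else d) y0
  (PySem.List.sorted yd.keys (fun k => k) false).map (fun k => yd.getD k 0)

-- ===== PORT B =====
-- 'ys[prev_idx]' is ported with pyGetD default 0: prev_idx is a first-occurrence index (in range)
-- or the initial 0, whose out-of-range (IndexError) case is excluded by Pre_ exactly as in A.
def merge_y_1_alt (x_list : List Int) (x_name : String) (y_name : String)
    (iterables : List (String × Option (List (String × List Int)))) : List Int :=
  let totals0 : PySem.Dict Int Int := x_list.foldl (fun d i => d.insert i 0) PySem.Dict.empty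
  let n : Int := x_list.length
  let totals : PySem.Dict Int Int :=
    (iterables.map Prod.snd).foldl (fun d data =>
      match data with
      | none => d
      | some dat =>
        let dd : PySem.Dict String (List Int) := PySem.Dict.mk dat
        match dd.get? x_name, dd.get? y_name with
        | some xa, some ya =>
          if xa.length == ya.length then
            let first : PySem.Dict Int Int :=
              (PySem.List.enumerate xa).reverse.foldl (fun m p => m.insert p.2 p.1) PySem.Dict.empty
            let hits : List (Int × Int) :=
              (PySem.List.enumerate x_list).filterMap
                (fun p => (first.get? p.2).map (fun idx => (p.1, idx)))
            let st : List Int × Int × Int :=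
              hits.foldl (fun (st : List Int × Int × Int) h =>
                (if h.1 > st.2.1 then
                    st.1 ++ List.replicate (h.1 - st.2.1).toNat (PySem.List.pyGetD ya st.2.2 0)
                  else st.1, h.1, h.2)) ([], 0, 0)
            let vec : List Int :=
              if n > st.2.1 then
                st.1 ++ List.replicate (n - st.2.1).toNat (PySem.List.pyGetD ya st.2.2 0)
              else st.1
            (x_list.zip vec).foldl (fun d p => d.modify p.1 0 (· + p.2)) d
          else d
        | _, _ => d) totals0
  (PySem.List.sorted totals.keys (fun k => k) false).map (fun k => totals.getD k 0)

-- ===== PRECONDITION & SPEC =====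
-- Pre_ excludes (a) duplicate dict keys (outer iterables or an inner data dict), on which the
-- association-list model cannot match Python's dict, and (b) inputs where A raises IndexError
-- (an iterable with both keys mapped to equal-length empty lists while x_list is nonempty).
def Pre_merge_y_1 (x_list : List Int) (x_name : String) (y_name : String)
    (iterables : List (String × Option (List (String × List Int)))) : Prop :=
  ((decide (iterables.map Prod.fst).Nodup) &&
    iterables.all (fun p =>
      p.2.elim true (fun d =>
        (decide (d.map Prod.fst).Nodup) &&
        (x_list.isEmpty ||
          !(decide ((PySem.Dict.mk d).get? x_name = some ([] : List Int)) &&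
            decide ((PySem.Dict.mk d).get? y_name = some ([] : List Int))))))) = true
instance (x_list : List Int) (x_name : String) (y_name : String) (iterables : List (String × Option (List (String × List Int)))) : Decidable (Pre_merge_y_1 x_list x_name y_name iterables) := by unfold Pre_merge_y_1; infer_instance

def pvWitness_merge_y_1 : List Int × String × String × (List (String × Option (List (String × List Int)))) :=
  ([3, 1, 1, 2], "x", "y", [("a", some [("x", [1, 2]), ("y", [10, 20])]), ("b", none)])

def Spec_merge_y_1 (x_list : List Int) (x_name : String) (y_name : String) (iterables : List (String × Option (List (String × List Int)))) (out : List Int) : Prop := out = merge_y_1_alt x_list x_name y_name iterables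
instance (x_list : List Int) (x_name : String) (y_name : String) (iterables : List (String × Option (List (String × List Int)))) (out : List Int) : Decidable (Spec_merge_y_1 x_list x_name y_name iterables out) := by unfold Spec_merge_y_1; infer_instance

-- ===== CLAIM (what is proved, stated in full; the proofs are below) =====
def Claim_equal_merge_y_1 : Prop := ∀ (x_list : List Int) (x_name : String) (y_name : String) (iterables : List (String × Option (List (String × List Int)))), Dom_merge_y_1 x_list x_name y_name iterables → Pre_merge_y_1 x_list x_name y_name iterables → Spec_merge_y_1 x_list x_name y_name iterables (merge_y_1 x_list x_name y_name iterables)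

-- ===== LEMMAS AND PROOFS =====

-- B's value→first-index dict (proof-only name for the term both ports build)
def fpOf (xa : List Int) : PySem.Dict Int Int :=
  (PySem.List.enumerate xa).reverse.foldl (fun m p => m.insert p.2 p.1) PySem.Dict.empty

-- A's per-iterable step, on the looked-up value (proof-only restatement of the port's fold body)
def pvStepA (x_list : List Int) (x_name y_name : String) (d : PySem.Dict Int Int)
    (data : Option (Option (List (String × List Int)))) : PySem.Dict Int Int :=
  match data with
  | none => d
  | some none => d
  | some (some itdata) =>
    let dd : PySem.Dict String (List Int) := PySem.Dict.mk itdata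
    if dd.contains x_name && dd.contains y_name then
      let xa := dd.getD x_name []
      let ya := dd.getD y_name []
      if xa.length == ya.length then
        (x_list.foldl (fun (st : PySem.Dict Int Int × Int) i =>
            let sfi : Int :=
              if xa.contains i then (((PySem.List.index? xa i).getD 0 : Nat) : Int) else st.2
            (st.1.modify i 0 (· + PySem.List.pyGetD ya sfi 0), sfi))
          (d, 0)).1
      else d
    else d

-- B's per-iterable step (proof-only restatement)
def pvStepB (x_list : List Int) (x_name y_name : String) (d : PySem.Dict Int Int)
    (data : Option (List (String × List Int))) : PySem.Dict Int Int :=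
  match data with
  | none => d
  | some dat =>
    let dd : PySem.Dict String (List Int) := PySem.Dict.mk dat
    match dd.get? x_name, dd.get? y_name with
    | some xa, some ya =>
      if xa.length == ya.length then
        let first := fpOf xa
        let hits : List (Int × Int) :=
          (PySem.List.enumerate x_list).filterMap
            (fun p => (first.get? p.2).map (fun idx => (p.1, idx)))
        let st : List Int × Int × Int :=
          hits.foldl (fun (st : List Int × Int × Int) h =>
            (if h.1 > st.2.1 then
                st.1 ++ List.replicate (h.1 - st.2.1).toNat (PySem.List.pyGetD ya st.2.2 0)
              else st.1, h.1, h.2)) ([], 0, 0)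
        let vec : List Int :=
          if (x_list.length : Int) > st.2.1 then
            st.1 ++ List.replicate ((x_list.length : Int) - st.2.1).toNat (PySem.List.pyGetD ya st.2.2 0)
          else st.1
        (x_list.zip vec).foldl (fun d p => d.modify p.1 0 (· + p.2)) d
      else d
    | _, _ => d

def pvDictA (x_list : List Int) (x_name y_name : String)
    (iterables : List (String × Option (List (String × List Int)))) : PySem.Dict Int Int :=
  (iterables.map Prod.fst).foldl
    (fun d it => pvStepA x_list x_name y_name d ((PySem.Dict.mk iterables).get? it))
    (x_list.foldl (fun d i => d.insert i 0) PySem.Dict.empty)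

def pvDictB (x_list : List Int) (x_name y_name : String)
    (iterables : List (String × Option (List (String × List Int)))) : PySem.Dict Int Int :=
  (iterables.map Prod.snd).foldl
    (fun d data => pvStepB x_list x_name y_name d data)
    (x_list.foldl (fun d i => d.insert i 0) PySem.Dict.empty)

lemma merge_y_1_eq (x_list : List Int) (x_name y_name : String)
    (iterables : List (String × Option (List (String × List Int)))) :
    merge_y_1 x_list x_name y_name iterables
      = (PySem.List.sorted (pvDictA x_list x_name y_name iterables).keys (fun k => k) false).map
          (fun k => (pvDictA x_list x_name y_name iterables).getD k 0) := rfl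

lemma merge_y_1_alt_eq (x_list : List Int) (x_name y_name : String)
    (iterables : List (String × Option (List (String × List Int)))) :
    merge_y_1_alt x_list x_name y_name iterables
      = (PySem.List.sorted (pvDictB x_list x_name y_name iterables).keys (fun k => k) false).map
          (fun k => (pvDictB x_list x_name y_name iterables).getD k 0) := rfl

-- B's first dict maps a value to its first index in xa (offset s = enumerate's start)
lemma fp_get? (xa : List Int) (s : Int) (v : Int) :
    ((PySem.List.enumerate xa s).reverse.foldl (fun m p => m.insert p.2 p.1)
        (PySem.Dict.empty : PySem.Dict Int Int)).get? v
      = (PySem.List.index? xa v).map (fun n : Nat => s + (n : Int)) := by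
  induction xa generalizing s with
  | nil => simp [PySem.List.enumerate_nil, PySem.List.index?_eq_idxOf?, List.idxOf?]
  | cons x xs ih =>
    rw [PySem.List.enumerate_cons]
    simp only [List.reverse_cons, List.foldl_append, List.foldl_cons, List.foldl_nil]
    rw [PySem.Dict.get?_insert]
    by_cases hv : v = x
    · subst hv
      rw [PySem.List.index?_cons_self]
      simp
    · rw [if_neg hv, ih (s + 1), PySem.List.index?_cons_of_ne xs (Ne.symm hv)]
      cases PySem.List.index? xs v with
      | none => simp
      | some n => simp; ring

-- A's carried-index update equals a lookup in B's first dict with the carry as default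
lemma sfi_bridge (xa : List Int) (i cur : Int) :
    (if xa.contains i then (((PySem.List.index? xa i).getD 0 : Nat) : Int) else cur)
      = ((fpOf xa).get? i).getD cur := by
  rw [show (fpOf xa).get? i = (PySem.List.index? xa i).map (fun n : Nat => (0 : Int) + n) from
      fp_get? xa 0 i]
  by_cases hm : i ∈ xa
  · obtain ⟨n, hn⟩ := Option.isSome_iff_exists.1 ((PySem.List.index?_isSome_iff xa i).2 hm)
    rw [if_pos (by simpa using hm), hn]
    simp
  · rw [if_neg (by simpa using hm), (PySem.List.index?_eq_none_iff xa i).2 hm]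
    simp

-- the sequence of carried indices along xs, starting from cur
def pvIdxSeq (fp : PySem.Dict Int Int) : List Int → Int → List Int
  | [], _ => []
  | i :: t, cur => ((fp.get? i).getD cur) :: pvIdxSeq fp t ((fp.get? i).getD cur)

-- A's per-dataset fold = a zip-fold against the carried-index sequence mapped through ya
lemma a_fold_eq (xa ya : List Int) :
    ∀ (xs : List Int) (d : PySem.Dict Int Int) (cur : Int),
    (xs.foldl (fun (st : PySem.Dict Int Int × Int) i =>
        let sfi : Int :=
          if xa.contains i then (((PySem.List.index? xa i).getD 0 : Nat) : Int) else st.2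
        (st.1.modify i 0 (· + PySem.List.pyGetD ya sfi 0), sfi)) (d, cur)).1
      = (xs.zip ((pvIdxSeq (fpOf xa) xs cur).map (fun c => PySem.List.pyGetD ya c 0))).foldl
          (fun d p => d.modify p.1 0 (· + p.2)) d := by
  intro xs
  induction xs with
  | nil => intro d cur; rfl
  | cons i t ih =>
    intro d cur
    simp only [List.foldl_cons, pvIdxSeq, List.map_cons, List.zip_cons_cons]
    rw [sfi_bridge xa i cur]
    exact ih _ _

-- B's hit list and segment fill, named for the induction
def pvHits (fp : PySem.Dict Int Int) (xs : List Int) (p : Int) : List (Int × Int) :=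
  (PySem.List.enumerate xs p).filterMap (fun pr => (fp.get? pr.2).map (fun idx => (pr.1, idx)))

def pvFill (ya : List Int) (hits : List (Int × Int)) (st : List Int × Int × Int) :
    List Int × Int × Int :=
  hits.foldl (fun (st : List Int × Int × Int) h =>
    (if h.1 > st.2.1 then
        st.1 ++ List.replicate (h.1 - st.2.1).toNat (PySem.List.pyGetD ya st.2.2 0)
      else st.1, h.1, h.2)) st

def pvFinish (ya : List Int) (e : Int) (st : List Int × Int × Int) : List Int :=
  if e > st.2.1 then st.1 ++ List.replicate (e - st.2.1).toNat (PySem.List.pyGetD ya st.2.2 0)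
  else st.1

-- the segment fill produces exactly ya sampled along the carried-index sequence
lemma fill_eq (fp : PySem.Dict Int Int) (ya : List Int) :
    ∀ (xs : List Int) (p : Int) (acc : List Int) (q cur : Int), q ≤ p →
    pvFinish ya (p + xs.length) (pvFill ya (pvHits fp xs p) (acc, q, cur))
      = acc ++ List.replicate (p - q).toNat (PySem.List.pyGetD ya cur 0)
          ++ (pvIdxSeq fp xs cur).map (fun c => PySem.List.pyGetD ya c 0) := by
  intro xs
  induction xs with
  | nil =>
    intro p acc q cur hqp
    simp only [pvHits, PySem.List.enumerate_nil, List.filterMap_nil, pvFill, List.foldl_nil,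
      pvIdxSeq, List.map_nil, List.append_nil, List.length_nil, Int.natCast_zero, add_zero,
      pvFinish]
    split_ifs with h
    · rfl
    · have : (p - q).toNat = 0 := by omega
      simp [this]
  | cons i t ih =>
    intro p acc q cur hqp
    have hlen : (p : Int) + ((i :: t).length : Int) = (p + 1) + (t.length : Int) := by
      simp only [List.length_cons]
      push_cast
      ring
    rw [hlen]
    simp only [pvHits, PySem.List.enumerate_cons, List.filterMap_cons]
    cases hfp : fp.get? i with
    | none =>
      simp only [Option.map_none]
      have := ih (p + 1) acc q cur (by omega)
      rw [show pvHits fp t (p + 1)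
            = (PySem.List.enumerate t (p + 1)).filterMap
                (fun pr => (fp.get? pr.2).map (fun idx => (pr.1, idx))) from rfl] at this
      rw [this]
      simp only [pvIdxSeq, hfp, Option.getD_none, List.map_cons]
      have hk : (p + 1 - q).toNat = (p - q).toNat + 1 := by omega
      rw [hk, List.replicate_succ']
      simp
    | some idx =>
      simp only [Option.map_some]
      rw [show List.filterMap (fun pr => Option.map (fun idx => (pr.1, idx)) (fp.get? pr.2))
            (PySem.List.enumerate t (p + 1)) = pvHits fp t (p + 1) from rfl]
      have hstep : pvFill ya ((p, idx) :: pvHits fp t (p + 1)) (acc, q, cur)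
          = pvFill ya (pvHits fp t (p + 1))
              (acc ++ List.replicate (p - q).toNat (PySem.List.pyGetD ya cur 0), p, idx) := by
        simp only [pvFill, List.foldl_cons]
        congr 2
        split_ifs with h
        · rfl
        · have : (p - q).toNat = 0 := by omega
          simp [this]
      rw [hstep, ih (p + 1) _ p idx (by omega)]
      simp only [pvIdxSeq, hfp, Option.getD_some, List.map_cons]
      have h1 : (p + 1 - p).toNat = 1 := by omega
      rw [h1]
      simp [List.replicate]
-- the per-iterable steps of A and B agree on every looked-up value
lemma step_eq (x_list : List Int) (x_name y_name : String) (d : PySem.Dict Int Int)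
    (data : Option (List (String × List Int))) :
    pvStepA x_list x_name y_name d (some data) = pvStepB x_list x_name y_name d data := by
  cases data with
  | none => rfl
  | some itdata =>
    unfold pvStepA pvStepB
    simp only []
    rw [PySem.Dict.contains_eq_isSome_get?, PySem.Dict.contains_eq_isSome_get?]
    cases hx : (PySem.Dict.mk itdata).get? x_name with
    | none => simp
    | some xa =>
      cases hy : (PySem.Dict.mk itdata).get? y_name with
      | none => simp
      | some ya =>
        simp only [Option.isSome_some, Bool.and_self, if_true]
        rw [PySem.Dict.getD_of_get?_eq_some _ _ hx, PySem.Dict.getD_of_get?_eq_some _ _ hy]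
        by_cases hlen : (xa.length == ya.length) = true
        · rw [if_pos hlen, if_pos hlen]
          rw [a_fold_eq xa ya x_list d 0]
          have hfill := fill_eq (fpOf xa) ya x_list 0 [] 0 0 le_rfl
          simp only [zero_add, sub_zero, Int.toNat_zero, List.replicate_zero, List.nil_append,
            List.append_nil] at hfill
          rw [show pvFinish ya (x_list.length : Int)
                  (pvFill ya (pvHits (fpOf xa) x_list 0) ([], 0, 0))
                = (let st := pvFill ya (pvHits (fpOf xa) x_list 0) ([], 0, 0);
                   if (x_list.length : Int) > st.2.1 then
                     st.1 ++ List.replicate ((x_list.length : Int) - st.2.1).toNat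
                       (PySem.List.pyGetD ya st.2.2 0)
                   else st.1) from rfl] at hfill
          rw [← hfill]
          rfl
        · rw [if_neg hlen, if_neg hlen]

-- iterating a nodup-keyed dict's keys and looking each value up = iterating its values
lemma foldl_keys_lookup {V S : Type} (h : S → Option V → S) :
    ∀ (l : List (String × V)) (init : S), (l.map Prod.fst).Nodup →
      (l.map Prod.fst).foldl (fun s k => h s ((PySem.Dict.mk l).get? k)) init
        = (l.map Prod.snd).foldl (fun s v => h s (some v)) init := by
  intro l
  induction l with
  | nil => intro init _; rfl
  | cons p t ih =>
    obtain ⟨k0, v0⟩ := p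
    intro init hnd
    rw [List.map_cons, List.nodup_cons] at hnd
    simp only [List.map_cons, List.foldl_cons]
    have h1 : (PySem.Dict.mk ((k0, v0) :: t)).get? k0 = some v0 := by
      rw [PySem.Dict.get?_mk_cons]; simp
    rw [h1]
    have hc := PySem.List.foldl_congr_mem (t.map Prod.fst)
      (fun s k => h s ((PySem.Dict.mk ((k0, v0) :: t)).get? k))
      (fun s k => h s ((PySem.Dict.mk t).get? k))
      (h init (some v0))
      (by
        intro acc x hx
        have hne : k0 ≠ x := fun he => hnd.1 (he ▸ hx)
        show h acc ((PySem.Dict.mk ((k0, v0) :: t)).get? x) = h acc ((PySem.Dict.mk t).get? x)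
        rw [PySem.Dict.get?_mk_cons]
        simp [hne])
    rw [hc]
    exact ih _ hnd.2

lemma dicts_eq (x_list : List Int) (x_name y_name : String)
    (iterables : List (String × Option (List (String × List Int))))
    (hnd : (iterables.map Prod.fst).Nodup) :
    pvDictA x_list x_name y_name iterables = pvDictB x_list x_name y_name iterables := by
  unfold pvDictA pvDictB
  rw [foldl_keys_lookup (pvStepA x_list x_name y_name) iterables _ hnd]
  apply PySem.List.foldl_congr_mem
  intro d data _
  exact step_eq x_list x_name y_name d data

-- ===== VERDICT (by name: the statement is the Claim_ definition above) =====
theorem merge_y_1_spec : Claim_equal_merge_y_1 := by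
  intro x_list x_name y_name iterables _hdom hpre
  unfold Pre_merge_y_1 at hpre
  rw [Bool.and_eq_true, decide_eq_true_eq] at hpre
  unfold Spec_merge_y_1
  rw [merge_y_1_eq, merge_y_1_alt_eq, dicts_eq x_list x_name y_name iterables hpre.1]
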